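-- pv_equiv track=rewrite | github.com/Supra14/Quantum | bb84_3.py | sift_key
-- ===== SOURCE A (Python) =====
-- def sift_key(alice_bases, bob_bases, alice_bits, bob_bits):
--     sifted_key_alice = []
--     sifted_key_bob = []
--     matching_indices = []
--
--     for i in range(len(alice_bases)):
--         if alice_bases[i] == bob_bases[i]:  # Bases match
--             sifted_key_alice.append(alice_bits[i])
--             sifted_key_bob.append(bob_bits[i])
--             matching_indices.append(i)
--
--     return matching_indices, sifted_key_alice, sifted_key_bob
-- ===== SOURCE B (Python) =====
-- def sift_key(alice_bases, bob_bases, alice_bits, bob_bits):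
--     # Divide-and-conquer over the index range: solve halves, concatenate results.
--     def solve(lo, hi):
--         if hi - lo <= 0:
--             return [], [], []
--         if hi - lo == 1:
--             if alice_bases[lo] == bob_bases[lo]:
--                 return [lo], [alice_bits[lo]], [bob_bits[lo]]
--             return [], [], []
--         mid = (lo + hi) // 2
--         li, la, lb = solve(lo, mid)
--         ri, ra, rb = solve(mid, hi)
--         return li + ri, la + ra, lb + rb
--     return solve(0, len(alice_bases))
-- ===== Notes on version B (the rewrite author's own statement) =====
-- stated objective: alternative
-- what changed: Replaces A's single left-to-right triple-append loop by a divide-and-conquer over the index range: the range is split at its midpoint, each half is sifted recursively, and the three result lists are concatenated.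
import Mathlib
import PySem

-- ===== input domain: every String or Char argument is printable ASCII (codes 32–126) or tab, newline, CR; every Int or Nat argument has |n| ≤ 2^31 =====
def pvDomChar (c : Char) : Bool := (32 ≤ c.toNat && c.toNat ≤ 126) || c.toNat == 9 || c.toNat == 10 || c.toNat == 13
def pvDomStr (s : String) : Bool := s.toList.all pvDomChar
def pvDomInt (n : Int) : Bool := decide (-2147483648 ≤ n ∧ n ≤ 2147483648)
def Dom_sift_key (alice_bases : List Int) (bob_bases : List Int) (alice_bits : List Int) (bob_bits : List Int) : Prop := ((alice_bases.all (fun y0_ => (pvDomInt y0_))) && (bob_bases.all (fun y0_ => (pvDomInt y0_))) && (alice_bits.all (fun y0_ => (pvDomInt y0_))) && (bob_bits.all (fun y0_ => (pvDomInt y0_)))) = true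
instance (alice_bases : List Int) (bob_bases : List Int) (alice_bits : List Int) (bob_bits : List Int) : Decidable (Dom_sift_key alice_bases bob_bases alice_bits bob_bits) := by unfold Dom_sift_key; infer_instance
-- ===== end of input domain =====

-- B replaces A's single left-to-right triple-append loop by a divide-and-conquer
-- over the index range (split at the midpoint, recurse, concatenate); objective: alternative.
-- ===== PORT A =====
def sift_key (alice_bases : List Int) (bob_bases : List Int) (alice_bits : List Int) (bob_bits : List Int) : List Int × List Int × List Int :=
  -- state = (sifted_key_alice, sifted_key_bob, matching_indices), appended exactly as A does
  let st := (PySem.List.pyRange 0 (alice_bases.length : Int) 1).foldl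
    (fun (s : List Int × List Int × List Int) i =>
      if PySem.List.pyGetD alice_bases i 0 == PySem.List.pyGetD bob_bases i 0 then
        (s.1 ++ [PySem.List.pyGetD alice_bits i 0],
         s.2.1 ++ [PySem.List.pyGetD bob_bits i 0],
         s.2.2 ++ [i])
      else s) ([], [], [])
  (st.2.2, st.1, st.2.1)

-- ===== PORT B =====
-- the inner recursive helper 'solve' of Source B
def sift_solve (alice_bases : List Int) (bob_bases : List Int) (alice_bits : List Int) (bob_bits : List Int) (lo hi : Int) : List Int × List Int × List Int :=
  if hi - lo ≤ 0 then ([], [], [])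
  else if hi - lo = 1 then
    if PySem.List.pyGetD alice_bases lo 0 == PySem.List.pyGetD bob_bases lo 0 then
      ([lo], [PySem.List.pyGetD alice_bits lo 0], [PySem.List.pyGetD bob_bits lo 0])
    else ([], [], [])
  else
    let mid := PySem.Int.floordiv (lo + hi) 2
    let L := sift_solve alice_bases bob_bases alice_bits bob_bits lo mid
    let R := sift_solve alice_bases bob_bases alice_bits bob_bits mid hi
    (L.1 ++ R.1, L.2.1 ++ R.2.1, L.2.2 ++ R.2.2)
termination_by (hi - lo).toNat
decreasing_by
  · have h2 : PySem.Int.floordiv (lo + hi) 2 = (lo + hi) / 2 :=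
      PySem.Int.floordiv_eq_ediv_of_pos (by norm_num)
    rw [h2]; omega
  · have h2 : PySem.Int.floordiv (lo + hi) 2 = (lo + hi) / 2 :=
      PySem.Int.floordiv_eq_ediv_of_pos (by norm_num)
    rw [h2]; omega

def sift_key_alt (alice_bases : List Int) (bob_bases : List Int) (alice_bits : List Int) (bob_bits : List Int) : List Int × List Int × List Int :=
  sift_solve alice_bases bob_bases alice_bits bob_bits 0 (alice_bases.length : Int)

-- ===== PRECONDITION & SPEC =====
-- Pre_ excludes exactly the inputs where the Python A raises IndexError:
-- bob_bases shorter than alice_bases, or a bit list too short at a matching index.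
def Pre_sift_key (alice_bases : List Int) (bob_bases : List Int) (alice_bits : List Int) (bob_bits : List Int) : Prop :=
  alice_bases.length ≤ bob_bases.length ∧
  ∀ i : Nat, i < alice_bases.length → alice_bases.getD i 0 = bob_bases.getD i 0 →
    i < alice_bits.length ∧ i < bob_bits.length
instance (alice_bases : List Int) (bob_bases : List Int) (alice_bits : List Int) (bob_bits : List Int) : Decidable (Pre_sift_key alice_bases bob_bases alice_bits bob_bits) := by unfold Pre_sift_key; infer_instance

def pvWitness_sift_key : List Int × List Int × List Int × List Int := ([0, 1], [0, 0], [1, 1], [0, 1])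

def Spec_sift_key (alice_bases : List Int) (bob_bases : List Int) (alice_bits : List Int) (bob_bits : List Int) (out : List Int × List Int × List Int) : Prop := out = sift_key_alt alice_bases bob_bases alice_bits bob_bits
instance (alice_bases : List Int) (bob_bases : List Int) (alice_bits : List Int) (bob_bits : List Int) (out : List Int × List Int × List Int) : Decidable (Spec_sift_key alice_bases bob_bases alice_bits bob_bits out) := by unfold Spec_sift_key; infer_instance

-- ===== CLAIM =====
def Claim_equal_sift_key : Prop := ∀ (alice_bases : List Int) (bob_bases : List Int) (alice_bits : List Int) (bob_bits : List Int), Dom_sift_key alice_bases bob_bases alice_bits bob_bits → Pre_sift_key alice_bases bob_bases alice_bits bob_bits → Spec_sift_key alice_bases bob_bases alice_bits bob_bits (sift_key alice_bases bob_bases alice_bits bob_bits)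

-- ===== LEMMAS AND PROOFS =====
-- A's single triple-append pass equals filter + two gathers, for any accumulators.
theorem foldl_triple_append (p : Int → Bool) (f g : Int → Int) (l : List Int)
    (x y z : List Int) :
    l.foldl (fun (s : List Int × List Int × List Int) i =>
        if p i then (s.1 ++ [f i], s.2.1 ++ [g i], s.2.2 ++ [i]) else s) (x, y, z)
      = (x ++ (l.filter p).map f, y ++ (l.filter p).map g, z ++ l.filter p) := by
  induction l generalizing x y z with
  | nil => simp
  | cons h t ih => by_cases hp : p h <;> simp [hp, ih]

-- B's divide-and-conquer computes filter + two gathers over the index range.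
theorem sift_solve_eq (ab bb abit bbit : List Int) (lo hi : Int) :
    sift_solve ab bb abit bbit lo hi
      = (((PySem.List.pyRange lo hi 1).filter
            (fun i => PySem.List.pyGetD ab i 0 == PySem.List.pyGetD bb i 0)),
         ((PySem.List.pyRange lo hi 1).filter
            (fun i => PySem.List.pyGetD ab i 0 == PySem.List.pyGetD bb i 0)).map
              (fun i => PySem.List.pyGetD abit i 0),
         ((PySem.List.pyRange lo hi 1).filter
            (fun i => PySem.List.pyGetD ab i 0 == PySem.List.pyGetD bb i 0)).map
              (fun i => PySem.List.pyGetD bbit i 0)) := by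
  rw [sift_solve]
  by_cases h0 : hi - lo ≤ 0
  · simp [h0, PySem.List.pyRange_one_eq_nil (by omega : hi ≤ lo)]
  · by_cases h1 : hi - lo = 1
    · have : hi = lo + 1 := by omega
      subst this
      simp [PySem.List.pyRange_one_singleton, List.filter]
      by_cases hp : PySem.List.pyGetD ab lo 0 = PySem.List.pyGetD bb lo 0
      · simp [hp]
      · have hb : (PySem.List.pyGetD ab lo 0 == PySem.List.pyGetD bb lo 0) = false := by
          simp [hp]
        simp [hb]
        exact hp
    · have h2 : PySem.Int.floordiv (lo + hi) 2 = (lo + hi) / 2 :=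
        PySem.Int.floordiv_eq_ediv_of_pos (by norm_num)
      have hlm : lo ≤ PySem.Int.floordiv (lo + hi) 2 := by rw [h2]; omega
      have hmh : PySem.Int.floordiv (lo + hi) 2 ≤ hi := by rw [h2]; omega
      simp only [h0, h1, if_false]
      rw [sift_solve_eq, sift_solve_eq,
          PySem.List.pyRange_one_append lo (PySem.Int.floordiv (lo + hi) 2) hi hlm hmh,
          List.filter_append, List.map_append, List.map_append]
termination_by (hi - lo).toNat
decreasing_by
  · have h2 : PySem.Int.floordiv (lo + hi) 2 = (lo + hi) / 2 :=
      PySem.Int.floordiv_eq_ediv_of_pos (by norm_num)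
    rw [h2]; omega
  · have h2 : PySem.Int.floordiv (lo + hi) 2 = (lo + hi) / 2 :=
      PySem.Int.floordiv_eq_ediv_of_pos (by norm_num)
    rw [h2]; omega

-- ===== VERDICT =====
theorem sift_key_spec : Claim_equal_sift_key := by
  intro ab bb abit bbit _ _
  unfold Spec_sift_key sift_key sift_key_alt
  rw [foldl_triple_append, sift_solve_eq]
  simp
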